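-- pv_equiv track=rewrite | github.com/grknsytrk/fin-assistant | src/metrics_extractor.py | _choose_aligned_number_index
-- ===== SOURCE A (Python) =====
-- from typing import TYPE_CHECKING, Any, Dict, List, Optional, Sequence, Tuple
--
-- def _choose_aligned_number_index(
--     metric: str,
--     quarter: str,
--     row_numbers: Sequence[str],
--     period_columns: Sequence[Dict[str, Optional[str]]],
-- ) -> int:
--     if not row_numbers:
--         return 0
--     limit = min(len(row_numbers), len(period_columns))
--     if limit > 0:
--         # First preference: explicit quarter alignment.
--         quarter_matches: List[Tuple[int, int]] = []
--         for idx in range(limit):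
--             if period_columns[idx].get("quarter") == quarter:
--                 year_raw = period_columns[idx].get("year")
--                 year_num = int(year_raw) if year_raw and str(year_raw).isdigit() else -1
--                 quarter_matches.append((idx, year_num))
--         if quarter_matches:
--             quarter_matches.sort(key=lambda item: (item[1], item[0]), reverse=True)
--             return quarter_matches[0][0]
--         # Second preference: latest year column.
--         year_candidates: List[Tuple[int, int]] = []
--         for idx in range(limit):
--             year_raw = period_columns[idx].get("year")
--             if year_raw and str(year_raw).isdigit():
--                 year_candidates.append((idx, int(year_raw)))
--         if year_candidates:
--             year_candidates.sort(key=lambda item: item[1], reverse=True)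
--             return year_candidates[0][0]
--
--     # Conservative fallback: margins often appear as last percentage column.
--     if metric in {"net_kar_marji", "favok_marji", "brut_kar_marji"}:
--         return len(row_numbers) - 1
--     return len(row_numbers) - 1
-- ===== SOURCE B (Python) =====
-- def _choose_aligned_number_index(metric, quarter, row_numbers, period_columns):
--     # Single pass over the aligned columns keeping two running "best" trackers
--     # instead of building candidate lists and sorting them; the dead
--     # metric-set fallback (both branches identical) collapses to one return.
--     if not row_numbers:
--         return 0
--     limit = min(len(row_numbers), len(period_columns))
--     best_q_idx = None   # quarter match maximising (year, idx): year ties -> later column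
--     best_q_year = 0
--     best_y_idx = None   # first column carrying the strictly highest digit-year
--     best_y_year = 0
--     for idx in range(limit):
--         column = period_columns[idx]
--         year_raw = column.get("year")
--         year = int(year_raw) if year_raw and str(year_raw).isdigit() else None
--         if column.get("quarter") == quarter:
--             y = -1 if year is None else year
--             if best_q_idx is None or y >= best_q_year:
--                 best_q_idx, best_q_year = idx, y
--         if year is not None and (best_y_idx is None or year > best_y_year):
--             best_y_idx, best_y_year = idx, year
--     if best_q_idx is not None:
--         return best_q_idx
--     if best_y_idx is not None:
--         return best_y_idx
--     return len(row_numbers) - 1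
-- ===== Notes on version B (the rewrite author's own statement) =====
-- stated objective: alternative
-- what changed: Replaces the two build-list-then-stable-reverse-sort passes by a single pass that keeps two running argmax trackers (quarter match by (year, idx) with >= so the last maximal year wins; year candidate by strictly-greater year so the first maximal year wins) and collapses the dead identical-branch metric fallback.
import Mathlib
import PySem

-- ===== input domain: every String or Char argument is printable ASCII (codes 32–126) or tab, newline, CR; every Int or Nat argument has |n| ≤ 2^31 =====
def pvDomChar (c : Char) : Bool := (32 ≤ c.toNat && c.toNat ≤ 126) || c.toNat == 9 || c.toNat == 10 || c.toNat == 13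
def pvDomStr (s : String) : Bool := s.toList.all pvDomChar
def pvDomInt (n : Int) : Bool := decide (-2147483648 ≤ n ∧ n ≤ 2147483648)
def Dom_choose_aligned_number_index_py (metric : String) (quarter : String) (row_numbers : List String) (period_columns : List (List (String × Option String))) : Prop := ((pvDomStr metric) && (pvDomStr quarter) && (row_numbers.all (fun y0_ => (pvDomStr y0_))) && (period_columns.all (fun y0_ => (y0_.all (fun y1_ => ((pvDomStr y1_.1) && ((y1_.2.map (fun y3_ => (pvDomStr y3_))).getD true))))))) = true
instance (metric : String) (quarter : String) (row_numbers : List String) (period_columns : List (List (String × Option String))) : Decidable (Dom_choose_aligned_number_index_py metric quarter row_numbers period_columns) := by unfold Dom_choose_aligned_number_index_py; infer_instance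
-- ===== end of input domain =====

-- B replaces A's two build-a-list-then-stable-reverse-sort passes by one pass keeping two
-- running best trackers (and drops A's dead metric-set fallback whose branches are identical);
-- objective: alternative (same answer, different algorithm).

-- Shared boundary helpers: `column.get(k)` on the dict a pair list denotes (a stored None and a
-- missing key both behave as Python None → none), and the `int(year_raw) if year_raw and
-- str(year_raw).isdigit() else <nothing>` pattern both sources use verbatim.
def pvGet (col : List (String × Option String)) (k : String) : Option String :=
  match (PySem.Dict.ofList col).get? k with
  | some (some s) => some s
  | _ => none

def pvYearNum? (col : List (String × Option String)) : Option Int :=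
  match pvGet col "year" with
  | some s =>
      -- `year_raw and str(year_raw).isdigit()`; ofStr? always succeeds on an all-digit string
      if s ≠ "" && PySem.Str.strIsdigit s then some ((PySem.Int.ofStr? s).getD 0) else none
  | none => none

-- ===== PORT A =====
-- loop body of A's first `for idx in range(limit)` (append quarter matches)
def pvQMStep (quarter : String) (pc : List (List (String × Option String)))
    (acc : List (Int × Int)) (idx : Nat) : List (Int × Int) :=
  let col := pc.getD idx []   -- idx < limit ≤ pc.length, so getD never defaults
  if pvGet col "quarter" = some quarter then
    acc ++ [((idx : Int), (pvYearNum? col).getD (-1))]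
  else acc

-- loop body of A's second `for idx in range(limit)` (append year candidates)
def pvYCStep (pc : List (List (String × Option String)))
    (acc : List (Int × Int)) (idx : Nat) : List (Int × Int) :=
  let col := pc.getD idx []
  match pvYearNum? col with
  | some y => acc ++ [((idx : Int), y)]
  | none => acc

def choose_aligned_number_index_py (metric : String) (quarter : String) (row_numbers : List String) (period_columns : List (List (String × Option String))) : Int :=
  if row_numbers = [] then 0
  else
    let limit := min row_numbers.length period_columns.length
    let fallback : Int :=
      if ["net_kar_marji", "favok_marji", "brut_kar_marji"].contains metric then
        (row_numbers.length : Int) - 1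
      else (row_numbers.length : Int) - 1
    if 0 < limit then
      let quarter_matches := (List.range limit).foldl (pvQMStep quarter period_columns) []
      match PySem.List.sorted2 quarter_matches (fun p => p.2) (fun p => p.1) true with
      | m :: _ => m.1
      | [] =>
        let year_candidates := (List.range limit).foldl (pvYCStep period_columns) []
        match PySem.List.sorted year_candidates (fun p => p.2) true with
        | m :: _ => m.1
        | [] => fallback
    else fallback

-- ===== PORT B =====
-- loop body of B's single pass: st.1 = best quarter match (year ties -> later column),
-- st.2 = first column with the strictly highest digit-year
def pvBStep (quarter : String) (pc : List (List (String × Option String)))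
    (st : Option (Int × Int) × Option (Int × Int)) (idx : Nat) :
    Option (Int × Int) × Option (Int × Int) :=
  let col := pc.getD idx []
  let year := pvYearNum? col
  let st1 :=
    if pvGet col "quarter" = some quarter then
      let y := year.getD (-1)
      match st.1 with
      | none => some ((idx : Int), y)
      | some b => if b.2 ≤ y then some ((idx : Int), y) else some b
    else st.1
  let st2 :=
    match year with
    | some yn =>
        match st.2 with
        | none => some ((idx : Int), yn)
        | some b => if b.2 < yn then some ((idx : Int), yn) else some b
    | none => st.2
  (st1, st2)

def choose_aligned_number_index_py_alt (metric : String) (quarter : String) (row_numbers : List String) (period_columns : List (List (String × Option String))) : Int :=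
  if row_numbers = [] then 0
  else
    let limit := min row_numbers.length period_columns.length
    let st := (List.range limit).foldl (pvBStep quarter period_columns) (none, none)
    match st.1 with
    | some m => m.1
    | none =>
      match st.2 with
      | some m => m.1
      | none => (row_numbers.length : Int) - 1

-- ===== PRECONDITION & SPEC =====
def Spec_choose_aligned_number_index_py (metric : String) (quarter : String) (row_numbers : List String) (period_columns : List (List (String × Option String))) (out : Int) : Prop := out = choose_aligned_number_index_py_alt metric quarter row_numbers period_columns
instance (metric : String) (quarter : String) (row_numbers : List String) (period_columns : List (List (String × Option String))) (out : Int) : Decidable (Spec_choose_aligned_number_index_py metric quarter row_numbers period_columns out) := by unfold Spec_choose_aligned_number_index_py; infer_instance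

-- ===== CLAIM (what is proved, stated in full; the proofs are below) =====
def Claim_equal_choose_aligned_number_index_py : Prop := ∀ (metric : String) (quarter : String) (row_numbers : List String) (period_columns : List (List (String × Option String))), Dom_choose_aligned_number_index_py metric quarter row_numbers period_columns → Spec_choose_aligned_number_index_py metric quarter row_numbers period_columns (choose_aligned_number_index_py metric quarter row_numbers period_columns)

-- ===== LEMMAS AND PROOFS =====

-- proof-side: the optional entry each column contributes to A's two candidate lists
def pvGQ (quarter : String) (pc : List (List (String × Option String))) (idx : Nat) :
    Option (Int × Int) :=
  let col := pc.getD idx []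
  if pvGet col "quarter" = some quarter then some ((idx : Int), (pvYearNum? col).getD (-1))
  else none

def pvGY (pc : List (List (String × Option String))) (idx : Nat) : Option (Int × Int) :=
  (pvYearNum? (pc.getD idx [])).map (fun y => ((idx : Int), y))

-- proof-side: B's two trackers as binary pick functions
def pvPickQ (h : Option (Int × Int)) (x : Int × Int) : Option (Int × Int) :=
  match h with
  | none => some x
  | some b => if b.2 ≤ x.2 then some x else some b

def pvPickY (h : Option (Int × Int)) (x : Int × Int) : Option (Int × Int) :=
  match h with
  | none => some x
  | some b => if b.2 < x.2 then some x else some b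

-- the head of an insertion-sort fold is a running binary pick
theorem pv_head?_foldl_insertBy {α : Type} (before : α → α → Bool) :
    ∀ (xs acc : List α),
      (xs.foldl (fun a x => PySem.List.insertBy before x a) acc).head?
        = xs.foldl (fun h x =>
            match h with
            | none => some x
            | some y => if before x y then some x else some y) acc.head? := by
  intro xs
  induction xs with
  | nil => intro acc; rfl
  | cons x t ih =>
      intro acc
      rw [List.foldl_cons, ih, List.foldl_cons]
      congr 1
      cases acc with
      | nil => rfl
      | cons y ys => simp [PySem.List.insertBy]; split <;> simp

-- on a list with strictly increasing indices, A's lexicographic (year, idx) pick is B's `year ≥` pick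
theorem pv_pick2_eq_pickQ :
    ∀ (l : List (Int × Int)) (a : Option (Int × Int)),
      l.Pairwise (fun u v => u.1 < v.1) →
      (∀ x, a = some x → ∀ u ∈ l, x.1 < u.1) →
      l.foldl (fun h x =>
          match h with
          | none => some x
          | some y => if (decide (y.2 < x.2) || (!decide (x.2 < y.2) && decide (y.1 < x.1))) then some x else some y) a
        = l.foldl pvPickQ a := by
  intro l
  induction l with
  | nil => intro a _ _; rfl
  | cons x t ih =>
      intro a hp hacc
      rw [List.foldl_cons, List.foldl_cons]
      have hp' := (List.pairwise_cons.mp hp).2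
      have hx := (List.pairwise_cons.mp hp).1
      cases a with
      | none =>
          exact ih (some x) hp' (fun z hz u hu => by injection hz with h; subst h; exact hx u hu)
      | some y =>
          have hyx : y.1 < x.1 := hacc y rfl x (List.mem_cons_self)
          have hstep : (match some y with
              | none => some x
              | some y => if (decide (y.2 < x.2) || (!decide (x.2 < y.2) && decide (y.1 < x.1))) = true then some x else some y)
              = pvPickQ (some y) x := by
            by_cases h1 : y.2 < x.2 <;> by_cases h2 : x.2 < y.2 <;>
              simp [h1, h2, hyx, pvPickQ] <;> omega
          rw [hstep]
          apply ih _ hp'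
          intro z hz u hu
          simp only [pvPickQ] at hz
          split at hz
          · injection hz with h; subst h; exact hx u hu
          · injection hz with h; subst h
            exact hacc y rfl u (List.mem_cons_of_mem _ hu)

-- folding a pick that always returns `some` never comes back to `none`
theorem pv_foldl_pickQ_some : ∀ (l : List (Int × Int)) (y : Int × Int),
    ∃ z, l.foldl pvPickQ (some y) = some z := by
  intro l
  induction l with
  | nil => exact fun y => ⟨y, rfl⟩
  | cons x t ih =>
      intro y
      rw [List.foldl_cons]
      show ∃ z, t.foldl pvPickQ (pvPickQ (some y) x) = some z
      simp only [pvPickQ]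
      split <;> exact ih _

theorem pv_foldl_pickY_some : ∀ (l : List (Int × Int)) (y : Int × Int),
    ∃ z, l.foldl pvPickY (some y) = some z := by
  intro l
  induction l with
  | nil => exact fun y => ⟨y, rfl⟩
  | cons x t ih =>
      intro y
      rw [List.foldl_cons]
      show ∃ z, t.foldl pvPickY (pvPickY (some y) x) = some z
      simp only [pvPickY]
      split <;> exact ih _

-- B's combined fold splits into the two pick-folds over the filtered entry lists
theorem pv_bstep_split (quarter : String) (pc : List (List (String × Option String))) :
    ∀ (l : List Nat) (a b : Option (Int × Int)),
      l.foldl (pvBStep quarter pc) (a, b)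
        = ((l.filterMap (pvGQ quarter pc)).foldl pvPickQ a,
           (l.filterMap (pvGY pc)).foldl pvPickY b) := by
  intro l
  induction l with
  | nil => intro a b; rfl
  | cons x t ih =>
      intro a b
      rw [List.foldl_cons]
      have hstep : pvBStep quarter pc (a, b) x
          = ((match pvGQ quarter pc x with | some e => pvPickQ a e | none => a),
             (match pvGY pc x with | some e => pvPickY b e | none => b)) := by
        cases hy : pvYearNum? (pc.getD x []) <;>
          by_cases hq : pvGet (pc.getD x []) "quarter" = some quarter <;>
            cases a <;> cases b <;>
              (simp only [List.getD] at hy hq;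
               simp [pvBStep, pvGQ, pvGY, pvPickQ, pvPickY, List.getD, hy, hq])
      rw [hstep]
      cases hgq : pvGQ quarter pc x <;> cases hgy : pvGY pc x <;>
        simp [hgq, hgy, ih]

-- A's quarter-match list is the filterMap of pvGQ
theorem pv_qm_eq (quarter : String) (pc : List (List (String × Option String))) :
    ∀ (l : List Nat) (acc : List (Int × Int)),
      l.foldl (pvQMStep quarter pc) acc = acc ++ l.filterMap (pvGQ quarter pc) := by
  intro l
  induction l with
  | nil => intro acc; simp
  | cons x t ih =>
      intro acc
      rw [List.foldl_cons]
      by_cases hq : pvGet (pc.getD x []) "quarter" = some quarter <;>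
        (simp only [List.getD] at hq;
         simp [pvQMStep, pvGQ, List.getD, hq, ih])

theorem pv_yc_eq (pc : List (List (String × Option String))) :
    ∀ (l : List Nat) (acc : List (Int × Int)),
      l.foldl (pvYCStep pc) acc = acc ++ l.filterMap (pvGY pc) := by
  intro l
  induction l with
  | nil => intro acc; simp
  | cons x t ih =>
      intro acc
      rw [List.foldl_cons]
      cases hy : pvYearNum? (pc.getD x []) <;>
        (simp only [List.getD] at hy;
         simp [pvYCStep, pvGY, List.getD, hy, ih])

-- indices contributed by pvGQ are the column indices, so the filtered list is .1-increasing
theorem pv_qm_pairwise (quarter : String) (pc : List (List (String × Option String))) (n : Nat) :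
    ((List.range n).filterMap (pvGQ quarter pc)).Pairwise (fun u v => u.1 < v.1) := by
  have h := List.pairwise_lt_range (n := n)
  refine List.Pairwise.filterMap _ (fun a b hab => ?_) h
  intro x hx y hy
  have hxa : x.1 = (a : Int) := by
    simp only [pvGQ] at hx; split at hx
    · cases hx; rfl
    · cases hx
  have hyb : y.1 = (b : Int) := by
    simp only [pvGQ] at hy; split at hy
    · cases hy; rfl
    · cases hy
  rw [hxa, hyb]; exact_mod_cast hab

-- head of the reverse (year, idx)-sort of the quarter matches = B's quarter tracker
theorem pv_sorted2_head (l : List (Int × Int))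
    (hp : l.Pairwise (fun u v => u.1 < v.1)) :
    (PySem.List.sorted2 l (fun p => p.2) (fun p => p.1) true).head? = l.foldl pvPickQ none := by
  have h0 : PySem.List.sorted2 l (fun p : Int × Int => p.2) (fun p => p.1) true
      = l.foldl (fun acc x => PySem.List.insertBy
          (fun a b => decide (b.2 < a.2) || (!decide (a.2 < b.2) && decide (b.1 < a.1))) x acc) [] := rfl
  rw [h0, pv_head?_foldl_insertBy]
  simp only [List.head?_nil]
  have h1 := pv_pick2_eq_pickQ l none hp (fun x h => nomatch h)
  convert h1 using 2
  funext h x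
  cases h <;> rfl

-- head of the reverse year-sort of the year candidates = B's year tracker
theorem pv_sorted_head (l : List (Int × Int)) :
    (PySem.List.sorted l (fun p => p.2) true).head? = l.foldl pvPickY none := by
  have h0 : PySem.List.sorted l (fun p : Int × Int => p.2) true
      = l.foldl (fun acc x => PySem.List.insertBy (fun a b => decide (b.2 < a.2)) x acc) [] := rfl
  rw [h0, pv_head?_foldl_insertBy]
  simp only [List.head?_nil]
  congr 1
  funext h x
  cases h with
  | none => rfl
  | some y => simp [pvPickY]

-- ===== VERDICT (by name: the statement is the Claim_ definition above) =====
theorem choose_aligned_number_index_py_spec : Claim_equal_choose_aligned_number_index_py := by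
  intro metric quarter row_numbers period_columns _
  unfold Spec_choose_aligned_number_index_py
  unfold choose_aligned_number_index_py choose_aligned_number_index_py_alt
  by_cases hrn : row_numbers = []
  · simp [hrn]
  · simp only [hrn, if_false]
    set limit := min row_numbers.length period_columns.length with hlim
    by_cases hl : 0 < limit
    · simp only [hl, if_true]
      rw [pv_qm_eq, List.nil_append, pv_bstep_split]
      cases hq : ((List.range limit).filterMap (pvGQ quarter period_columns)).foldl pvPickQ none with
      | some m =>
          have hh := pv_sorted2_head _ (pv_qm_pairwise quarter period_columns limit)
          rw [hq] at hh
          cases hs : PySem.List.sorted2 ((List.range limit).filterMap (pvGQ quarter period_columns))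
              (fun p => p.2) (fun p => p.1) true with
          | nil => rw [hs] at hh; cases hh
          | cons m' t => rw [hs] at hh; cases hh; rfl
      | none =>
          have hnil : (List.range limit).filterMap (pvGQ quarter period_columns) = [] := by
            cases hc : (List.range limit).filterMap (pvGQ quarter period_columns) with
            | nil => rfl
            | cons z zs =>
                rw [hc, List.foldl_cons] at hq
                obtain ⟨w, hw⟩ := pv_foldl_pickQ_some zs z
                rw [show pvPickQ none z = some z from rfl, hw] at hq
                cases hq
          rw [hnil]
          rw [show PySem.List.sorted2 ([] : List (Int × Int)) (fun p => p.2) (fun p => p.1) true = [] from rfl]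
          rw [pv_yc_eq, List.nil_append]
          cases hy : ((List.range limit).filterMap (pvGY period_columns)).foldl pvPickY none with
          | some m =>
              have hh := pv_sorted_head ((List.range limit).filterMap (pvGY period_columns))
              rw [hy] at hh
              cases hs : PySem.List.sorted ((List.range limit).filterMap (pvGY period_columns))
                  (fun p => p.2) true with
              | nil => rw [hs] at hh; cases hh
              | cons m' t => rw [hs] at hh; cases hh; rfl
          | none =>
              have hnil2 : (List.range limit).filterMap (pvGY period_columns) = [] := by
                cases hc : (List.range limit).filterMap (pvGY period_columns) with
                | nil => rfl
                | cons z zs =>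
                    rw [hc, List.foldl_cons] at hy
                    obtain ⟨w, hw⟩ := pv_foldl_pickY_some zs z
                    rw [show pvPickY none z = some z from rfl, hw] at hy
                    cases hy
              rw [hnil2]
              rw [show PySem.List.sorted ([] : List (Int × Int)) (fun p => p.2) true = [] from rfl]
              split_ifs <;> rfl
    · have h0 : limit = 0 := by omega
      simp only [h0, List.range_zero, List.foldl_nil]
      split_ifs <;> rfl
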